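-- pv_equiv track=rewrite | github.com/imyjimmy/investing-platform | src/investing_platform/services/edgar.py | _annual_form_family
-- ===== SOURCE A (Python) =====
-- from typing import Any
--
-- def _annual_form_family(filings: list[dict[str, Any]]) -> set[str]:
--     forms = {str(filing.get("form") or "").upper() for filing in filings}
--     if {"20-F", "20-F/A"} & forms:
--         return {"20-F", "20-F/A"}
--     if {"40-F", "40-F/A"} & forms:
--         return {"40-F", "40-F/A"}
--     if {"10-K", "10-K/A"} & forms:
--         return {"10-K", "10-K/A"}
--     return set()
-- ===== SOURCE B (Python) =====
-- _RANK = {"20-F": 0, "20-F/A": 0, "40-F": 1, "40-F/A": 1, "10-K": 2, "10-K/A": 2}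
-- _RESULT = [{"20-F", "20-F/A"}, {"40-F", "40-F/A"}, {"10-K", "10-K/A"}, set()]
--
-- def _annual_form_family(filings):
--     best = 3
--     for filing in filings:
--         best = min(best, _RANK.get(str(filing.get("form") or "").upper(), 3))
--         if best == 0:
--             break
--     return _RESULT[best]
-- ===== Notes on version B (the rewrite author's own statement) =====
-- stated objective: alternative
-- what changed: Replaces A's build-a-set-of-forms followed by three literal set-intersection checks with a single pass that folds each filing's form to a numeric priority rank, keeps the running minimum with early exit at rank 0, and indexes a result table with the final minimum.
import Mathlib
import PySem

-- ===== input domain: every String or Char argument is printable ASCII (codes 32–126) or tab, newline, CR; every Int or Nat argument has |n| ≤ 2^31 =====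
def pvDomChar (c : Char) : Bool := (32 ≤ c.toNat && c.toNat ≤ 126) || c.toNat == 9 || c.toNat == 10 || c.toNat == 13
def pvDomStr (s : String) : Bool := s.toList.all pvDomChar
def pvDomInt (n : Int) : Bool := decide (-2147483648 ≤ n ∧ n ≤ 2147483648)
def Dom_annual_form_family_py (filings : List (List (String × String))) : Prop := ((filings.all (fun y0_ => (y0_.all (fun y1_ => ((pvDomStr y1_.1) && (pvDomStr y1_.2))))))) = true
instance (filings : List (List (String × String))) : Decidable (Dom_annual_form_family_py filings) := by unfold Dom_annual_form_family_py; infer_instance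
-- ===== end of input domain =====

-- B replaces A's set-of-forms + three literal set-intersection checks with a single pass folding
-- each form to a numeric priority rank, keeping the running minimum (early exit at 0) and indexing
-- a result table (alternative decomposition, same cost).

-- ===== PORT A =====
def annual_form_family_py (filings : List (List (String × String))) : List String :=
  let forms : PySem.Set String :=
    PySem.Set.ofList (filings.map (fun filing => PySem.Str.upper (PySem.Dict.getD (PySem.Dict.mk filing) "form" "")))
  if PySem.Set.inter (PySem.Set.ofList ["20-F", "20-F/A"]) forms ≠ [] then
    PySem.Set.ofList ["20-F", "20-F/A"]
  else if PySem.Set.inter (PySem.Set.ofList ["40-F", "40-F/A"]) forms ≠ [] then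
    PySem.Set.ofList ["40-F", "40-F/A"]
  else if PySem.Set.inter (PySem.Set.ofList ["10-K", "10-K/A"]) forms ≠ [] then
    PySem.Set.ofList ["10-K", "10-K/A"]
  else
    PySem.Set.empty

-- ===== PORT B =====
def pvRankDict : PySem.Dict String Nat :=
  PySem.Dict.mk [("20-F", 0), ("20-F/A", 0), ("40-F", 1), ("40-F/A", 1), ("10-K", 2), ("10-K/A", 2)]

def pvResultTable : List (List String) :=
  [["20-F", "20-F/A"], ["40-F", "40-F/A"], ["10-K", "10-K/A"], []]

-- _RANK.get(str(filing.get("form") or "").upper(), 3)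
def pvRank (filing : List (String × String)) : Nat :=
  PySem.Dict.getD pvRankDict (PySem.Str.upper (PySem.Dict.getD (PySem.Dict.mk filing) "form" "")) 3

-- the `for`-loop with `break`: running minimum of the ranks, early exit at 0
def pvBestLoop : List (List (String × String)) → Nat → Nat
  | [], best => best
  | filing :: rest, best =>
    let best' := min best (pvRank filing)
    if best' = 0 then best' else pvBestLoop rest best'

def annual_form_family_py_alt (filings : List (List (String × String))) : List String :=
  -- _RESULT[best]; best is always ≤ 3 so the Python index is in range, getD's default is unreachable
  pvResultTable.getD (pvBestLoop filings 3) []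

-- ===== PRECONDITION & SPEC =====
def Spec_annual_form_family_py (filings : List (List (String × String))) (out : List String) : Prop := out = annual_form_family_py_alt filings
instance (filings : List (List (String × String))) (out : List String) : Decidable (Spec_annual_form_family_py filings out) := by unfold Spec_annual_form_family_py; infer_instance

-- ===== CLAIM (what is proved, stated in full; the proofs are below) =====
def Claim_equal_annual_form_family_py : Prop := ∀ (filings : List (List (String × String))), Dom_annual_form_family_py filings → Spec_annual_form_family_py filings (annual_form_family_py filings)

-- ===== LEMMAS AND PROOFS =====
-- minimum rank of a list (pure foldr form of the loop)
def pvMinRank (filings : List (List (String × String))) : Nat :=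
  filings.foldr (fun f a => min (pvRank f) a) 3

lemma pvMinRank_nil : pvMinRank [] = 3 := rfl

lemma pvMinRank_cons (f : List (String × String)) (r : List (List (String × String))) :
    pvMinRank (f :: r) = min (pvRank f) (pvMinRank r) := rfl

lemma pvRank_le_three (f : List (String × String)) : pvRank f ≤ 3 := by
  unfold pvRank pvRankDict
  simp only [PySem.Dict.getD_eq_get?_getD, PySem.Dict.get?_mk_cons]
  split_ifs <;> simp [PySem.Dict.get?]

lemma pvRank_eq_zero_iff (f : List (String × String)) :
    pvRank f = 0 ↔ PySem.Str.upper (PySem.Dict.getD (PySem.Dict.mk f) "form" "") = "20-F" ∨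
      PySem.Str.upper (PySem.Dict.getD (PySem.Dict.mk f) "form" "") = "20-F/A" := by
  unfold pvRank pvRankDict
  generalize PySem.Str.upper (PySem.Dict.getD (PySem.Dict.mk f) "form" "") = s
  simp only [PySem.Dict.getD_eq_get?_getD, PySem.Dict.get?_mk_cons, beq_iff_eq]
  split_ifs with h1 h2 h3 h4 h5 h6
  · simp [← h1]
  · simp [← h2]
  · simp [← h3]
  · simp [← h4]
  · simp [← h5]
  · simp [← h6]
  · simp [PySem.Dict.get?, Ne.symm h1, Ne.symm h2]

lemma pvRank_eq_one_iff (f : List (String × String)) :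
    pvRank f = 1 ↔ PySem.Str.upper (PySem.Dict.getD (PySem.Dict.mk f) "form" "") = "40-F" ∨
      PySem.Str.upper (PySem.Dict.getD (PySem.Dict.mk f) "form" "") = "40-F/A" := by
  unfold pvRank pvRankDict
  generalize PySem.Str.upper (PySem.Dict.getD (PySem.Dict.mk f) "form" "") = s
  simp only [PySem.Dict.getD_eq_get?_getD, PySem.Dict.get?_mk_cons, beq_iff_eq]
  split_ifs with h1 h2 h3 h4 h5 h6
  · simp [← h1]
  · simp [← h2]
  · simp [← h3]
  · simp [← h4]
  · simp [← h5]
  · simp [← h6]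
  · simp [PySem.Dict.get?, Ne.symm h3, Ne.symm h4]

lemma pvRank_eq_two_iff (f : List (String × String)) :
    pvRank f = 2 ↔ PySem.Str.upper (PySem.Dict.getD (PySem.Dict.mk f) "form" "") = "10-K" ∨
      PySem.Str.upper (PySem.Dict.getD (PySem.Dict.mk f) "form" "") = "10-K/A" := by
  unfold pvRank pvRankDict
  generalize PySem.Str.upper (PySem.Dict.getD (PySem.Dict.mk f) "form" "") = s
  simp only [PySem.Dict.getD_eq_get?_getD, PySem.Dict.get?_mk_cons, beq_iff_eq]
  split_ifs with h1 h2 h3 h4 h5 h6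
  · simp [← h1]
  · simp [← h2]
  · simp [← h3]
  · simp [← h4]
  · simp [← h5]
  · simp [← h6]
  · simp [PySem.Dict.get?, Ne.symm h5, Ne.symm h6]

lemma pvMinRank_le (fs : List (List (String × String))) : pvMinRank fs ≤ 3 := by
  induction fs with
  | nil => simp [pvMinRank_nil]
  | cons f r ih => rw [pvMinRank_cons]; omega

-- the loop computes min b (pvMinRank fs) for any start value b ≤ 3
lemma pvBestLoop_eq (fs : List (List (String × String))) :
    ∀ b, b ≤ 3 → pvBestLoop fs b = min b (pvMinRank fs) := by
  induction fs with
  | nil => intro b hb; simp [pvBestLoop, pvMinRank_nil]; omega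
  | cons f rest ih =>
    intro b hb
    simp only [pvBestLoop, pvMinRank_cons]
    have hf := pvRank_le_three f
    have hr := pvMinRank_le rest
    by_cases h : min b (pvRank f) = 0
    · rw [if_pos h]; omega
    · rw [if_neg h, ih _ (by omega)]; omega

lemma pvMinRank_eq_zero_iff (fs : List (List (String × String))) :
    pvMinRank fs = 0 ↔ ∃ f ∈ fs, pvRank f = 0 := by
  induction fs with
  | nil => simp [pvMinRank_nil]
  | cons f r ih =>
    rw [pvMinRank_cons]
    simp only [List.mem_cons]
    constructor
    · intro h
      have h' : pvRank f = 0 ∨ pvMinRank r = 0 := by omega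
      rcases h' with h0 | h0
      · exact ⟨f, Or.inl rfl, h0⟩
      · obtain ⟨g, hg, hg0⟩ := ih.mp h0; exact ⟨g, Or.inr hg, hg0⟩
    · rintro ⟨g, (rfl | hg), hg0⟩
      · omega
      · have := ih.mpr ⟨g, hg, hg0⟩; omega

lemma pvMinRank_le_iff (k : Nat) (fs : List (List (String × String))) (hk : k < 3) :
    pvMinRank fs ≤ k ↔ ∃ f ∈ fs, pvRank f ≤ k := by
  induction fs with
  | nil => simp [pvMinRank_nil]; omega
  | cons f r ih =>
    rw [pvMinRank_cons]
    simp only [List.mem_cons]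
    constructor
    · intro h
      have h' : pvRank f ≤ k ∨ pvMinRank r ≤ k := by omega
      rcases h' with h0 | h0
      · exact ⟨f, Or.inl rfl, h0⟩
      · obtain ⟨g, hg, hg0⟩ := ih.mp h0; exact ⟨g, Or.inr hg, hg0⟩
    · rintro ⟨g, (rfl | hg), hg0⟩
      · omega
      · have := ih.mpr ⟨g, hg, hg0⟩; omega

-- A's branch condition: the intersection is nonempty iff some filing's upper-cased form is in the family
lemma hit_iff (fam : List String) (filings : List (List (String × String))) :
    (PySem.Set.inter (PySem.Set.ofList fam)
      (PySem.Set.ofList (filings.map (fun filing => PySem.Str.upper (PySem.Dict.getD (PySem.Dict.mk filing) "form" "")))) ≠ []) ↔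
    ∃ f ∈ filings, PySem.Str.upper (PySem.Dict.getD (PySem.Dict.mk f) "form" "") ∈ fam := by
  simp only [ne_eq, PySem.Set.inter, List.filter_eq_nil_iff, not_forall, PySem.Set.contains,
    List.contains_iff_mem, PySem.Set.mem_ofList, List.mem_map, not_not]
  constructor
  · rintro ⟨x, hx, f, hf, rfl⟩; exact ⟨f, hf, hx⟩
  · rintro ⟨f, hf, hx⟩; exact ⟨_, hx, f, hf, rfl⟩

-- ===== VERDICT (by name: the statement is the Claim_ definition above) =====
theorem annual_form_family_py_spec : Claim_equal_annual_form_family_py := by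
  intro filings _
  unfold Spec_annual_form_family_py annual_form_family_py annual_form_family_py_alt
  rw [pvBestLoop_eq filings 3 (by omega)]
  have hle := pvMinRank_le filings
  by_cases h0 : ∃ f ∈ filings, PySem.Str.upper (PySem.Dict.getD (PySem.Dict.mk f) "form" "") ∈ (["20-F", "20-F/A"] : List String)
  · have hm : pvMinRank filings = 0 := by
      rw [pvMinRank_eq_zero_iff]
      obtain ⟨f, hf, hmem⟩ := h0
      exact ⟨f, hf, (pvRank_eq_zero_iff f).mpr (by simpa using hmem)⟩
    rw [if_pos ((hit_iff _ _).mpr h0), hm]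
    rfl
  · rw [if_neg (mt (hit_iff ["20-F", "20-F/A"] filings).mp h0)]
    have hn0 : pvMinRank filings ≠ 0 := fun hm =>
      have ⟨f, hf, hr⟩ := (pvMinRank_eq_zero_iff filings).mp hm
      h0 ⟨f, hf, by simpa using (pvRank_eq_zero_iff f).mp hr⟩
    by_cases h1 : ∃ f ∈ filings, PySem.Str.upper (PySem.Dict.getD (PySem.Dict.mk f) "form" "") ∈ (["40-F", "40-F/A"] : List String)
    · have hm : pvMinRank filings = 1 := by
        have hle1 : pvMinRank filings ≤ 1 := by
          rw [pvMinRank_le_iff 1 filings (by omega)]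
          obtain ⟨f, hf, hmem⟩ := h1
          exact ⟨f, hf, le_of_eq ((pvRank_eq_one_iff f).mpr (by simpa using hmem))⟩
        omega
      rw [if_pos ((hit_iff _ _).mpr h1), hm]
      rfl
    · rw [if_neg (mt (hit_iff ["40-F", "40-F/A"] filings).mp h1)]
      have hn1 : pvMinRank filings ≠ 1 := by
        intro hm
        obtain ⟨f, hf, hr1⟩ := (pvMinRank_le_iff 1 filings (by omega)).mp (le_of_eq hm)
        have hr0 : pvRank f ≠ 0 := fun h =>
          h0 ⟨f, hf, by simpa using (pvRank_eq_zero_iff f).mp h⟩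
        have h1' : pvRank f = 1 := by omega
        exact h1 ⟨f, hf, by simpa using (pvRank_eq_one_iff f).mp h1'⟩
      by_cases h2 : ∃ f ∈ filings, PySem.Str.upper (PySem.Dict.getD (PySem.Dict.mk f) "form" "") ∈ (["10-K", "10-K/A"] : List String)
      · have hm : pvMinRank filings = 2 := by
          have hle2 : pvMinRank filings ≤ 2 := by
            rw [pvMinRank_le_iff 2 filings (by omega)]
            obtain ⟨f, hf, hmem⟩ := h2
            exact ⟨f, hf, le_of_eq ((pvRank_eq_two_iff f).mpr (by simpa using hmem))⟩
          omega
        rw [if_pos ((hit_iff _ _).mpr h2), hm]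
        rfl
      · rw [if_neg (mt (hit_iff ["10-K", "10-K/A"] filings).mp h2)]
        have hm : pvMinRank filings = 3 := by
          rcases Nat.lt_or_ge (pvMinRank filings) 3 with hlt | hge
          · exfalso
            obtain ⟨f, hf, hr2⟩ := (pvMinRank_le_iff 2 filings (by omega)).mp (by omega)
            have hr0 : pvRank f ≠ 0 := fun h =>
              h0 ⟨f, hf, by simpa using (pvRank_eq_zero_iff f).mp h⟩
            have hr1 : pvRank f ≠ 1 := fun h =>
              h1 ⟨f, hf, by simpa using (pvRank_eq_one_iff f).mp h⟩
            have h2' : pvRank f = 2 := by omega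
            exact h2 ⟨f, hf, by simpa using (pvRank_eq_two_iff f).mp h2'⟩
          · omega
        rw [hm]
        rfl
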